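-- pv_equiv track=rewrite | github.com/CTLab-ITMO/DigitalTwinBuilder | drift_lib/embedding_model.py | dialog_overlapping_windows
-- ===== SOURCE A (Python) =====
-- from typing import Iterable, List, Sequence
--
-- def dialog_overlapping_windows(
--     messages: list[dict],
--     window_messages: int,
--     stride: int,
-- ) -> list[str]:
--     """
--     Перекрывающиеся окна по списку сообщений (каждое окно — текст для passage-эмбеддинга).
--     """
--     if window_messages < 1 or stride < 1:
--         raise ValueError("window_messages и stride должны быть >= 1")
--     out: list[str] = []
--     n = len(messages)
--     if n == 0:
--         return out
--     start = 0
--     while start + window_messages <= n: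
--         chunk = messages[start : start + window_messages]
--         text = messages_to_window_text(chunk)
--         if text.strip():
--             out.append(text)
--         start += stride
--     if not out and messages:
--         out.append(messages_to_window_text(messages))
--     return out
--
-- def messages_to_window_text(messages: list[dict], roles: set[str] | None = None) -> str:
--     """Склеивает сообщения диалога в один текст для одного окна."""
--     roles = roles or {"user", "assistant", "system"}
--     lines: List[str] = []
--     for m in messages:
--         role = m.get("role", "")
--         content = (m.get("content") or "").strip()
--         if role not in roles or not content:
--             continue
--         lines.append(f"{role}: {content}")
--     return "\n".join(lines)
-- ===== SOURCE B (Python) =====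
-- def _fmt(m):
--     """Formatted line for one message, or '' if it is filtered out."""
--     role = m.get("role", "")
--     content = (m.get("content") or "").strip()
--     if role in ("user", "assistant", "system") and content:
--         return f"{role}: {content}"
--     return ""
--
--
-- def dialog_overlapping_windows(messages, window_messages, stride):
--     if window_messages < 1 or stride < 1:
--         raise ValueError("window_messages и stride должны быть >= 1")
--     if not messages:
--         return []
--     # Single streaming pass: a sliding buffer of formatted lines; emit a window
--     # whenever the buffer fills, then slide it by `stride` (skipping messages
--     # that fall between consecutive windows when stride > window_messages).
--     out = []
--     buf = []
--     skip = 0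
--     for m in messages:
--         if skip:
--             skip -= 1
--             continue
--         buf.append(_fmt(m))
--         if len(buf) == window_messages:
--             text = "\n".join(x for x in buf if x)
--             if text.strip():
--                 out.append(text)
--             if stride < window_messages:
--                 del buf[:stride]
--             else:
--                 buf.clear()
--                 skip = stride - window_messages
--     if not out:
--         out.append("\n".join(x for x in map(_fmt, messages) if x))
--     return out
-- ===== Notes on version B (the rewrite author's own statement) =====
-- stated objective: alternative
-- what changed: B replaces A's index-arithmetic while loop that re-slices and re-formats messages[start:start+window] for every window by a single streaming pass over the messages with a sliding buffer of formatted lines (emit when the buffer fills, then drop stride lines or skip stride-window messages), never slicing or revisiting a message.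
import Mathlib
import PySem

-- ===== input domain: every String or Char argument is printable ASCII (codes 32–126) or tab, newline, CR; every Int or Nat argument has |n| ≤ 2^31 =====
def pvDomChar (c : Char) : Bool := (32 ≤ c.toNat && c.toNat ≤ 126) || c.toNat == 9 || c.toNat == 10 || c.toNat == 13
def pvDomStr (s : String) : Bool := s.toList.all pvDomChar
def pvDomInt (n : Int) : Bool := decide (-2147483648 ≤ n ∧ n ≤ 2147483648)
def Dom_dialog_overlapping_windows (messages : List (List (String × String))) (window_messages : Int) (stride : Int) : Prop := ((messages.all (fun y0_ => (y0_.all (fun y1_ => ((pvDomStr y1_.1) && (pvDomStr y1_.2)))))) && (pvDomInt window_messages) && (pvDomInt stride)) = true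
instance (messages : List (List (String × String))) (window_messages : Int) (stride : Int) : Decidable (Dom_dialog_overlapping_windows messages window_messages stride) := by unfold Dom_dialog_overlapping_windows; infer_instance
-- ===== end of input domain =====

-- B replaces A's index-arithmetic while loop (re-slicing and re-formatting every window)
-- by one streaming pass with a sliding buffer of formatted lines (objective: alternative algorithm).
-- Pre_ excludes window_messages < 1 or stride < 1, where Python A raises ValueError.

-- ===== PORT A =====
-- messages_to_window_text with the default role set
def pvMtwText (messages : List (List (String × String))) : String :=
  PySem.Str.join "\n"
    (messages.foldl (fun lines m =>
      let role := (PySem.Dict.mk m).getD "role" ""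
      let content := PySem.Str.strip (((PySem.Dict.mk m).get? "content").getD "")
      if !(role == "user" || role == "assistant" || role == "system") || content == "" then
        lines
      else
        lines ++ [role ++ ": " ++ content]) [])

-- the while loop of A (fuel bounds the iteration count; n.toNat + 1 always suffices when stride ≥ 1)
def pvLoopA (messages : List (List (String × String))) (n wm stride : Int) :
    Nat → Int → List String → List String
  | 0, _, out => out
  | fuel + 1, start, out =>
    if start + wm ≤ n then
      let chunk := PySem.List.slice messages (some start) (some (start + wm))
      let text := pvMtwText chunk
      let out' := if PySem.Str.strip text != "" then out ++ [text] else out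
      pvLoopA messages n wm stride fuel (start + stride) out'
    else out

def dialog_overlapping_windows (messages : List (List (String × String))) (window_messages : Int) (stride : Int) : List String :=
  if window_messages < 1 || stride < 1 then []   -- Python raises ValueError here (outside Pre_)
  else
    let n : Int := messages.length
    if n = 0 then []
    else
      let out := pvLoopA messages n window_messages stride (n.toNat + 1) 0 []
      if out.isEmpty && !messages.isEmpty then out ++ [pvMtwText messages] else out

-- ===== PORT B =====
def pvFormatMessage (m : List (String × String)) : String :=
  let role := (PySem.Dict.mk m).getD "role" ""
  let content := PySem.Str.strip (((PySem.Dict.mk m).get? "content").getD "")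
  if (role == "user" || role == "assistant" || role == "system") && content != "" then
    role ++ ": " ++ content
  else ""

-- the body of B's for-loop; state = (out, buf, skip)
def pvStepB (wm stride : Int) (st : List String × List String × Int) (m : List (String × String)) :
    List String × List String × Int :=
  let out := st.1
  let buf := st.2.1
  let skip := st.2.2
  if skip != 0 then (out, buf, skip - 1)
  else
    let buf' := buf ++ [pvFormatMessage m]
    if (buf'.length : Int) == wm then
      let text := PySem.Str.join "\n" (buf'.filter (fun x => x != ""))
      let out' := if PySem.Str.strip text != "" then out ++ [text] else out
      if stride < wm then (out', buf'.drop stride.toNat, 0)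
      else (out', [], stride - wm)
    else (out, buf', skip)

def dialog_overlapping_windows_alt (messages : List (List (String × String))) (window_messages : Int) (stride : Int) : List String :=
  if window_messages < 1 || stride < 1 then []   -- Python raises ValueError here (outside Pre_)
  else if messages.isEmpty then []
  else
    let st := messages.foldl (pvStepB window_messages stride) ([], [], 0)
    if st.1.isEmpty then
      [PySem.Str.join "\n" ((messages.map pvFormatMessage).filter (fun x => x != ""))]
    else st.1

-- ===== PRECONDITION & SPEC =====
-- Pre_ excludes exactly the inputs where A raises ValueError (window_messages < 1 or stride < 1).
def Pre_dialog_overlapping_windows (messages : List (List (String × String))) (window_messages : Int) (stride : Int) : Prop :=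
  1 ≤ window_messages ∧ 1 ≤ stride
instance (messages : List (List (String × String))) (window_messages : Int) (stride : Int) : Decidable (Pre_dialog_overlapping_windows messages window_messages stride) := by unfold Pre_dialog_overlapping_windows; infer_instance
def pvWitness_dialog_overlapping_windows : (List (List (String × String))) × Int × Int :=
  ([[("role", "user"), ("content", "hi")], [("role", "assistant"), ("content", "yo")]], 1, 1)
def Spec_dialog_overlapping_windows (messages : List (List (String × String))) (window_messages : Int) (stride : Int) (out : List String) : Prop := out = dialog_overlapping_windows_alt messages window_messages stride
instance (messages : List (List (String × String))) (window_messages : Int) (stride : Int) (out : List String) : Decidable (Spec_dialog_overlapping_windows messages window_messages stride out) := by unfold Spec_dialog_overlapping_windows; infer_instance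

-- ===== CLAIM (what is proved, stated in full; the proofs are below) =====
def Claim_equal_dialog_overlapping_windows : Prop := ∀ (messages : List (List (String × String))) (window_messages : Int) (stride : Int), Dom_dialog_overlapping_windows messages window_messages stride → Pre_dialog_overlapping_windows messages window_messages stride → Spec_dialog_overlapping_windows messages window_messages stride (dialog_overlapping_windows messages window_messages stride)

-- ===== LEMMAS AND PROOFS =====

-- common specification both ports are reduced to: emit windows over the formatted lines,
-- dropping d'+1 lines between window starts
def pvEmit (out ys : List String) : List String :=
  let text := PySem.Str.join "\n" (ys.filter (fun x => x != ""))
  if PySem.Str.strip text != "" then out ++ [text] else out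

def pvEmitAll (W d' : Nat) (xs out : List String) : List String :=
  if h : xs.length < W ∨ W = 0 then out
  else pvEmitAll W d' (xs.drop (d' + 1)) (pvEmit out (xs.take W))
termination_by xs.length
decreasing_by simp only [List.length_drop]; omega

lemma pvEmitAll_stop (W d' : Nat) (xs out : List String) (h : xs.length < W) :
    pvEmitAll W d' xs out = out := by
  rw [pvEmitAll]; exact dif_pos (Or.inl h)

lemma pvEmitAll_step (W d' : Nat) (xs out : List String) (h : W ≤ xs.length) (hW : W ≠ 0) :
    pvEmitAll W d' xs out = pvEmitAll W d' (xs.drop (d' + 1)) (pvEmit out (xs.take W)) := by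
  rw [pvEmitAll]; exact dif_neg (by omega)

-- a kept line is never the empty string
lemma pvFormat_kept_ne (role content : String)
    (h : (role == "user" || role == "assistant" || role == "system") = true) :
    (role ++ ": " ++ content == "") = false := by
  simp only [beq_eq_false_iff_ne, ne_eq]
  intro he
  have ht := congrArg String.toList he
  simp only [beq_iff_eq, Bool.or_eq_true_iff] at h
  rcases h with (h | h) | h <;> subst h <;> simp at ht

-- A's per-message step, phrased through B's precomputed line
lemma pvStep_eq (m : List (String × String)) (lines : List String) :
    (let role := (PySem.Dict.mk m).getD "role" ""
     let content := PySem.Str.strip (((PySem.Dict.mk m).get? "content").getD "")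
     if !(role == "user" || role == "assistant" || role == "system") || content == "" then
       lines
     else
       lines ++ [role ++ ": " ++ content])
    = if pvFormatMessage m != "" then lines ++ [pvFormatMessage m] else lines := by
  simp only [pvFormatMessage]
  by_cases hr : ((PySem.Dict.mk m).getD "role" "" == "user"
      || (PySem.Dict.mk m).getD "role" "" == "assistant"
      || (PySem.Dict.mk m).getD "role" "" == "system") = true
  · by_cases hcnt : (PySem.Str.strip (((PySem.Dict.mk m).get? "content").getD "") == "") = true
    · have : (PySem.Str.strip (((PySem.Dict.mk m).get? "content").getD "") != "") = false := by
        simp [bne, hcnt]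
      simp [hr, hcnt, this]
    · have hb : (PySem.Str.strip (((PySem.Dict.mk m).get? "content").getD "") != "") = true := by
        simp [bne]; simpa using hcnt
      have hne := pvFormat_kept_ne ((PySem.Dict.mk m).getD "role" "")
        (PySem.Str.strip (((PySem.Dict.mk m).get? "content").getD "")) hr
      simp only [hr, hb, Bool.not_true, Bool.true_and, Bool.false_or, if_pos]
      rw [if_neg (by simp [hcnt]), if_pos (by simp [bne, hne])]
  · have hr' : ((PySem.Dict.mk m).getD "role" "" == "user"
      || (PySem.Dict.mk m).getD "role" "" == "assistant"
      || (PySem.Dict.mk m).getD "role" "" == "system") = false := by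
      simpa using hr
    simp [hr']

-- A's line accumulator = filter of B's precomputed lines
lemma pvLines_eq (ms : List (List (String × String))) (acc : List String) :
    ms.foldl (fun lines m =>
      let role := (PySem.Dict.mk m).getD "role" ""
      let content := PySem.Str.strip (((PySem.Dict.mk m).get? "content").getD "")
      if !(role == "user" || role == "assistant" || role == "system") || content == "" then
        lines
      else
        lines ++ [role ++ ": " ++ content]) acc
    = acc ++ (ms.map pvFormatMessage).filter (fun x => x != "") := by
  have hfn : (fun (lines : List String) (m : List (String × String)) =>
      let role := (PySem.Dict.mk m).getD "role" ""
      let content := PySem.Str.strip (((PySem.Dict.mk m).get? "content").getD "")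
      if !(role == "user" || role == "assistant" || role == "system") || content == "" then
        lines
      else
        lines ++ [role ++ ": " ++ content])
      = (fun (lines : List String) m =>
        if (pvFormatMessage m != "") = true then lines ++ [pvFormatMessage m] else lines) := by
    funext lines m; exact pvStep_eq m lines
  rw [hfn, PySem.List.foldl_append_if (fun m => pvFormatMessage m != "") pvFormatMessage ms acc,
    List.filter_map]
  rfl

-- A's chunk text = join of the filtered formatted lines of the corresponding take/drop slice
lemma pvChunkText_eq (messages : List (List (String × String))) (s wm : Int)
    (hs : 0 ≤ s) (hwm : 0 ≤ wm) :
    pvMtwText (PySem.List.slice messages (some s) (some (s + wm)))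
    = PySem.Str.join "\n"
        ((((messages.map pvFormatMessage).drop s.toNat).take wm.toNat).filter (fun x => x != "")) := by
  rw [PySem.List.slice_toNat _ hs (by omega)]
  rw [pvMtwText, pvLines_eq]
  have h : (s + wm).toNat - s.toNat = wm.toNat := by omega
  simp [h, List.map_take, List.map_drop]

-- A's while loop computes pvEmitAll over the formatted lines
lemma pvLoopA_eq_emitAll (messages : List (List (String × String))) (wm stride : Int)
    (hwm : 1 ≤ wm) (hst : 1 ≤ stride) :
    ∀ (fuel : Nat) (start : Int) (out : List String), 0 ≤ start →
      ((messages.length : Int) - wm + 1 - start).toNat ≤ fuel →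
      pvLoopA messages (messages.length : Int) wm stride fuel start out
      = pvEmitAll wm.toNat (stride.toNat - 1) ((messages.map pvFormatMessage).drop start.toNat) out := by
  intro fuel
  induction fuel with
  | zero =>
    intro start out h0 hf
    rw [pvEmitAll_stop]
    · rfl
    · simp only [List.length_drop, List.length_map]
      omega
  | succ fuel ih =>
    intro start out h0 hf
    by_cases h : start + wm ≤ (messages.length : Int)
    · rw [pvEmitAll_step _ _ _ _ (by simp only [List.length_drop, List.length_map]; omega) (by omega)]
      have hd : stride.toNat - 1 + 1 = stride.toNat := by omega
      have hdrop : ((messages.map pvFormatMessage).drop start.toNat).drop (stride.toNat - 1 + 1)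
          = (messages.map pvFormatMessage).drop (start + stride).toNat := by
        rw [List.drop_drop, hd]
        congr 1
        omega
      simp only [pvLoopA, if_pos h]
      rw [pvChunkText_eq messages start wm h0 (by omega)]
      rw [ih (start + stride) _ (by omega) (by omega), hdrop]
      rfl
    · simp only [pvLoopA, if_neg h]
      rw [pvEmitAll_stop]
      simp only [List.length_drop, List.length_map]
      omega

-- B's streaming fold computes pvEmitAll over the formatted lines
lemma pvFoldB_eq_emitAll (wm stride : Int) (hwm : 1 ≤ wm) (hst : 1 ≤ stride) :
    ∀ (L : List (List (String × String))) (out buf : List String) (skip : Int),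
      buf.length < wm.toNat → 0 ≤ skip → (skip ≠ 0 → buf = []) →
      (L.foldl (pvStepB wm stride) (out, buf, skip)).1
      = pvEmitAll wm.toNat (stride.toNat - 1) (buf ++ (L.map pvFormatMessage).drop skip.toNat) out := by
  intro L
  induction L with
  | nil =>
    intro out buf skip hb _ _
    rw [pvEmitAll_stop]
    · rfl
    · simpa using hb
  | cons m L' ih =>
    intro out buf skip hb hsk hske
    by_cases hskip : skip = 0
    · subst hskip
      have hstep : pvStepB wm stride (out, buf, 0) m =
          (let buf' := buf ++ [pvFormatMessage m]
           if (buf'.length : Int) == wm then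
             let text := PySem.Str.join "\n" (buf'.filter (fun x => x != ""))
             let out' := if PySem.Str.strip text != "" then out ++ [text] else out
             if stride < wm then (out', buf'.drop stride.toNat, 0)
             else (out', [], stride - wm)
           else (out, buf', 0)) := by
        simp [pvStepB]
      have hsplit : buf ++ ((m :: L').map pvFormatMessage).drop (0 : Int).toNat
          = (buf ++ [pvFormatMessage m]) ++ (L'.map pvFormatMessage) := by
        simp
      by_cases hlen : ((buf ++ [pvFormatMessage m]).length : Int) = wm
      · have hlenN : (buf ++ [pvFormatMessage m]).length = wm.toNat := by
          omega
        rw [hsplit, pvEmitAll_step _ _ _ _ (by rw [List.length_append, hlenN]; omega) (by omega)]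
        have htake : ((buf ++ [pvFormatMessage m]) ++ L'.map pvFormatMessage).take wm.toNat
            = buf ++ [pvFormatMessage m] := by
          rw [List.take_append, hlenN]
          simp [List.take_of_length_le (le_of_eq hlenN)]
        have hdrop : ((buf ++ [pvFormatMessage m]) ++ L'.map pvFormatMessage).drop (stride.toNat - 1 + 1)
            = (buf ++ [pvFormatMessage m]).drop stride.toNat
              ++ (L'.map pvFormatMessage).drop (stride.toNat - wm.toNat) := by
          rw [show stride.toNat - 1 + 1 = stride.toNat from by omega, List.drop_append, hlenN]
        by_cases hlt : stride < wm
        · have hres : pvStepB wm stride (out, buf, 0) m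
              = (pvEmit out (buf ++ [pvFormatMessage m]),
                 (buf ++ [pvFormatMessage m]).drop stride.toNat, 0) := by
            rw [hstep]
            simp only [hlen, beq_self_eq_true, if_pos, if_pos hlt]
            rfl
          rw [List.foldl_cons, hres,
            ih _ _ _ (by simp only [List.length_drop, hlenN]; omega) le_rfl (by simp)]
          rw [htake, hdrop]
          have h0 : stride.toNat - wm.toNat = 0 := by omega
          simp [h0]
        · have hres : pvStepB wm stride (out, buf, 0) m
              = (pvEmit out (buf ++ [pvFormatMessage m]), [], stride - wm) := by
            rw [hstep]
            simp only [hlen, beq_self_eq_true, if_pos, if_neg hlt]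
            rfl
          rw [List.foldl_cons, hres,
            ih _ _ _ (by simp; omega) (by omega) (fun _ => rfl)]
          rw [htake, hdrop]
          have hbd : (buf ++ [pvFormatMessage m]).drop stride.toNat = [] := by
            apply List.drop_eq_nil_of_le
            rw [hlenN]; omega
          have hsw : (stride - wm).toNat = stride.toNat - wm.toNat := by omega
          simp [hbd, hsw]
      · have hres : pvStepB wm stride (out, buf, 0) m = (out, buf ++ [pvFormatMessage m], 0) := by
          rw [hstep]
          simp only [beq_iff_eq, if_neg hlen]
        have hblen : (buf ++ [pvFormatMessage m]).length < wm.toNat := by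
          simp only [List.length_append, List.length_cons] at hlen ⊢
          simp only [List.length_nil] at hlen ⊢
          omega
        rw [List.foldl_cons, hres, ih _ _ _ hblen le_rfl (by simp), hsplit]
        simp
    · have hbuf : buf = [] := hske hskip
      subst hbuf
      have hres : pvStepB wm stride (out, [], skip) m = (out, [], skip - 1) := by
        simp only [pvStepB]
        rw [if_pos (by simp [bne]; omega)]
      rw [List.foldl_cons, hres,
        ih _ _ _ hb (by omega) (fun _ => rfl)]
      congr 1
      have h1 : skip.toNat = (skip - 1).toNat + 1 := by omega
      simp only [List.map_cons, h1, List.drop_succ_cons]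

-- ===== VERDICT (by name: the statement is the Claim_ definition above) =====
theorem dialog_overlapping_windows_spec : Claim_equal_dialog_overlapping_windows := by
  intro messages wm stride _ hpre
  obtain ⟨hwm, hst⟩ := hpre
  unfold Spec_dialog_overlapping_windows
  have hcond : (decide (wm < 1) || decide (stride < 1)) = false := by
    simp only [Bool.or_eq_false_iff, decide_eq_false_iff_not]
    omega
  by_cases hnil : messages = []
  · subst hnil
    simp [dialog_overlapping_windows, dialog_overlapping_windows_alt]
  · have hn : ¬ ((messages.length : Int) = 0) := by
      simp [List.length_eq_zero_iff, hnil]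
    have hne : (messages.isEmpty) = false := by
      simpa [List.isEmpty_iff] using hnil
    simp only [dialog_overlapping_windows, dialog_overlapping_windows_alt, hcond,
      Bool.false_eq_true, if_false, if_neg hn, hne]
    rw [pvLoopA_eq_emitAll messages wm stride hwm hst ((messages.length : Int).toNat + 1) 0 []
      le_rfl (by omega)]
    rw [pvFoldB_eq_emitAll wm stride hwm hst messages [] [] 0 (by simp; omega) le_rfl (by simp)]
    have hfb : pvMtwText messages
        = PySem.Str.join "\n" ((messages.map pvFormatMessage).filter (fun x => x != "")) := by
      rw [pvMtwText, pvLines_eq]; rfl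
    simp [hfb]
    split_ifs with h
    · rw [h]; simp
    · rfl
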